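-- pv_equiv track=rewrite | github.com/Ankush12852/fonus | backend/main.py | resolve_explicit_scope_target
-- ===== SOURCE A (Python) =====
-- from typing import Optional, List, Dict, Any
--
-- SCOPE_TARGET_PHRASES: list[tuple[str, str]] = [
--     ("compressor surge", "M15"),
--     ("shell model", "M9"),
--     ("shell interface", "M9"),
--     ("james reason", "M9"),
--     ("reason model", "M9"),
--     ("peame", "M9"),
--     ("hfacs", "M9"),
--     ("dirty dozen", "M9"),
--     ("arinc 664", "M5"),
--     ("arinc 429", "M5"),
--     ("afdx", "M5"),
--     ("ground resonance", "M12"),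
--     ("autorotation", "M12"),
--     ("retreating blade", "M12"),
--     ("dissymmetry of lift", "M12"),
--     ("engine seizure", "M16"),
--     ("magneto timing", "M16"),
--     ("propeller feather", "M17A"),
--     ("constant speed propeller", "M17A"),
--     ("permit to work", "M7A"),
--     ("lock out tag out", "M7A"),
--     ("explosive safety", "M7A"),
-- ]
--
-- def resolve_explicit_scope_target(question: str) -> Optional[str]:
--     """Return a syllabus module if the question contains an unambiguous phrase route."""
--     q = (question or "").lower()
--     if not q.strip():
--         return None
--     for phrase, mod in sorted(SCOPE_TARGET_PHRASES, key=lambda x: -len(x[0])):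
--         if phrase in q:
--             return mod
--     return None
-- ===== SOURCE B (Python) =====
-- from typing import Optional
--
-- SCOPE_TARGET_PHRASES: list[tuple[str, str]] = [
--     ("compressor surge", "M15"),
--     ("shell model", "M9"),
--     ("shell interface", "M9"),
--     ("james reason", "M9"),
--     ("reason model", "M9"),
--     ("peame", "M9"),
--     ("hfacs", "M9"),
--     ("dirty dozen", "M9"),
--     ("arinc 664", "M5"),
--     ("arinc 429", "M5"),
--     ("afdx", "M5"),
--     ("ground resonance", "M12"),
--     ("autorotation", "M12"),
--     ("retreating blade", "M12"),
--     ("dissymmetry of lift", "M12"),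
--     ("engine seizure", "M16"),
--     ("magneto timing", "M16"),
--     ("propeller feather", "M17A"),
--     ("constant speed propeller", "M17A"),
--     ("permit to work", "M7A"),
--     ("lock out tag out", "M7A"),
--     ("explosive safety", "M7A"),
-- ]
--
-- def resolve_explicit_scope_target(question: str) -> Optional[str]:
--     """Return a syllabus module if the question contains an unambiguous phrase route."""
--     q = (question or "").lower()
--     if not q.strip():
--         return None
--     best_mod = None
--     best_len = -1
--     for phrase, mod in SCOPE_TARGET_PHRASES:
--         if phrase in q and len(phrase) > best_len:
--             best_mod = mod
--             best_len = len(phrase)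
--     return best_mod
-- ===== Notes on version B (the rewrite author's own statement) =====
-- stated objective: simpler
-- what changed: Replaces the per-call stable sort of SCOPE_TARGET_PHRASES followed by a first-match scan with a single pass over the list in its given order that maintains a running longest-matching phrase (strict > keeps the earliest phrase on length ties, matching stable-sort tie-breaking).
import Mathlib
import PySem

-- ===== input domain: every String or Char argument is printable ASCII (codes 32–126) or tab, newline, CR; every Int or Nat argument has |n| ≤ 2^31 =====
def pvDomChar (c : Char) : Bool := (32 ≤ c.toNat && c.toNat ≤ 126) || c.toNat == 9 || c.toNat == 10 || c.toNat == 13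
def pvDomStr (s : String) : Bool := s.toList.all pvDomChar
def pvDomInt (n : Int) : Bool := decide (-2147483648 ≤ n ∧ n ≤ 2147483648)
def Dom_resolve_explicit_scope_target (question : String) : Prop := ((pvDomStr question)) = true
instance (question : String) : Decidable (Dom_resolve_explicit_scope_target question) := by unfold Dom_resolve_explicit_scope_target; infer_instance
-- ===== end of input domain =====

-- B replaces A's per-call stable sort + first-match scan by a single pass keeping the
-- running longest matching phrase (strict > reproduces stable-sort tie-breaking); simpler, no sort.


-- module-level constant shared by A and B
def SCOPE_TARGET_PHRASES : List (String × String) := [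
  ("compressor surge", "M15"),
  ("shell model", "M9"),
  ("shell interface", "M9"),
  ("james reason", "M9"),
  ("reason model", "M9"),
  ("peame", "M9"),
  ("hfacs", "M9"),
  ("dirty dozen", "M9"),
  ("arinc 664", "M5"),
  ("arinc 429", "M5"),
  ("afdx", "M5"),
  ("ground resonance", "M12"),
  ("autorotation", "M12"),
  ("retreating blade", "M12"),
  ("dissymmetry of lift", "M12"),
  ("engine seizure", "M16"),
  ("magneto timing", "M16"),
  ("propeller feather", "M17A"),
  ("constant speed propeller", "M17A"),
  ("permit to work", "M7A"),
  ("lock out tag out", "M7A"),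
  ("explosive safety", "M7A")]

-- ===== PORT A =====
-- the sort key  lambda x: -len(x[0])
def pvKey (x : String × String) : Int := -PySem.Str.len x.1

-- the for-loop with early return:  for phrase, mod in …: if phrase in q: return mod
def pvScanA (q : String) : List (String × String) → Option String
  | [] => none
  | (phrase, md) :: rest => if PySem.Str.isIn phrase q then some md else pvScanA q rest

def resolve_explicit_scope_target (question : String) : Option String :=
  let q := PySem.Str.lower (if question = "" then "" else question)   -- (question or "").lower()
  if PySem.Str.strip q = "" then none                                 -- if not q.strip(): return None
  else pvScanA q (PySem.List.sorted SCOPE_TARGET_PHRASES pvKey)       -- sorted(…, key=lambda x: -len(x[0]))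

-- ===== PORT B =====
-- loop body:  if phrase in q and len(phrase) > best_len: best_mod, best_len = mod, len(phrase)
def pvStepB (q : String) (acc : Option String × Int) (pm : String × String) : Option String × Int :=
  if PySem.Str.isIn pm.1 q && decide (acc.2 < PySem.Str.len pm.1) then (some pm.2, PySem.Str.len pm.1)
  else acc

def resolve_explicit_scope_target_alt (question : String) : Option String :=
  let q := PySem.Str.lower (if question = "" then "" else question)
  if PySem.Str.strip q = "" then none
  else (SCOPE_TARGET_PHRASES.foldl (pvStepB q) (none, -1)).1

-- ===== PRECONDITION & SPEC =====
def Spec_resolve_explicit_scope_target (question : String) (out : Option String) : Prop := out = resolve_explicit_scope_target_alt question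
instance (question : String) (out : Option String) : Decidable (Spec_resolve_explicit_scope_target question out) := by unfold Spec_resolve_explicit_scope_target; infer_instance

-- ===== CLAIM (what is proved, stated in full; the proofs are below) =====
def Claim_equal_resolve_explicit_scope_target : Prop := ∀ (question : String), Dom_resolve_explicit_scope_target question → Spec_resolve_explicit_scope_target question (resolve_explicit_scope_target question)

-- ===== LEMMAS AND PROOFS =====

-- the common characterisation: the first phrase (in list order) contained in q, with its length
def pvG (q : String) (L : List (String × String)) : Option String × Int :=
  match L.find? (fun x => PySem.Str.isIn x.1 q) with
  | some x => (some x.2, PySem.Str.len x.1)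
  | none => (none, -1)

lemma pvLen_nonneg (s : String) : 0 ≤ PySem.Str.len s := by
  simp [PySem.Str.len_eq]

lemma pvG_cons_pos (q : String) (x : String × String) (L : List (String × String))
    (h : PySem.Str.isIn x.1 q = true) : pvG q (x :: L) = (some x.2, PySem.Str.len x.1) := by
  have hf : List.find? (fun y => PySem.Str.isIn y.1 q) (x :: L) = some x :=
    List.find?_cons_of_pos h
  unfold pvG; rw [hf]

lemma pvG_cons_neg (q : String) (x : String × String) (L : List (String × String))
    (h : PySem.Str.isIn x.1 q = false) : pvG q (x :: L) = pvG q L := by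
  have hf : List.find? (fun y => PySem.Str.isIn y.1 q) (x :: L)
      = List.find? (fun y => PySem.Str.isIn y.1 q) L :=
    List.find?_cons_of_neg (fun hc => Bool.false_ne_true (h ▸ hc))
  unfold pvG; rw [hf]

lemma pvStepB_pos (q : String) (acc : Option String × Int) (pm : String × String)
    (h1 : PySem.Str.isIn pm.1 q = true) (h2 : acc.2 < PySem.Str.len pm.1) :
    pvStepB q acc pm = (some pm.2, PySem.Str.len pm.1) := by
  unfold pvStepB; rw [if_pos (by rw [h1, decide_eq_true h2, Bool.true_and])]

lemma pvStepB_skip (q : String) (acc : Option String × Int) (pm : String × String)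
    (h : PySem.Str.isIn pm.1 q = false) : pvStepB q acc pm = acc := by
  unfold pvStepB; rw [if_neg (by rw [h, Bool.false_and]; exact Bool.false_ne_true)]

lemma pvStepB_small (q : String) (acc : Option String × Int) (pm : String × String)
    (h : ¬ acc.2 < PySem.Str.len pm.1) : pvStepB q acc pm = acc := by
  unfold pvStepB
  refine if_neg (fun hc => h ?_)
  exact of_decide_eq_true ((Bool.and_eq_true _ _).mp hc).2

lemma pvScanA_eq_g (q : String) (L : List (String × String)) : pvScanA q L = (pvG q L).1 := by
  induction L with
  | nil => rfl
  | cons x rest ih =>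
      obtain ⟨ph, md⟩ := x
      cases h : PySem.Str.isIn ph q
      · simp only [pvScanA]
        rw [pvG_cons_neg q (ph, md) rest h, if_neg (by rw [h]; exact Bool.false_ne_true)]
        exact ih
      · simp only [pvScanA]
        rw [pvG_cons_pos q (ph, md) rest h, if_pos h]

lemma pvG_snd_le (q : String) (L : List (String × String)) (B : Int) (hB : -1 ≤ B)
    (h : ∀ y ∈ L, PySem.Str.len y.1 ≤ B) : (pvG q L).2 ≤ B := by
  unfold pvG
  cases hf : L.find? (fun x => PySem.Str.isIn x.1 q) with
  | none => exact hB
  | some x => exact h x (List.mem_of_find?_eq_some hf)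

-- one insertion step of A's stable sort matches one fold step of B's running best
lemma pvStepB_g (q : String) (x : String × String) (S : List (String × String))
    (hS : S.Pairwise (fun a b => pvKey a ≤ pvKey b)) :
    pvStepB q (pvG q S) x
      = pvG q (PySem.List.insertBy (fun a b => decide (pvKey a < pvKey b)) x S) := by
  induction S with
  | nil =>
      have hins : PySem.List.insertBy (fun a b => decide (pvKey a < pvKey b)) x [] = [x] := rfl
      cases hx : PySem.Str.isIn x.1 q
      · rw [hins, pvG_cons_neg q x [] hx]
        exact pvStepB_skip q _ x hx
      · rw [hins, pvG_cons_pos q x [] hx]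
        refine pvStepB_pos q _ x hx ?_
        have h0 : (pvG q []).2 = -1 := rfl
        have := pvLen_nonneg x.1
        omega
  | cons s S' ih =>
      have hS' := (List.pairwise_cons.mp hS).2
      have hhead := (List.pairwise_cons.mp hS).1
      by_cases hls : pvKey x < pvKey s
      · -- x is strictly longer than s: x is inserted in front of s
        have hins : PySem.List.insertBy (fun a b => decide (pvKey a < pvKey b)) x (s :: S')
            = x :: s :: S' := by simp [PySem.List.insertBy, hls]
        rw [hins]
        cases hx : PySem.Str.isIn x.1 q
        · rw [pvG_cons_neg q x _ hx]
          exact pvStepB_skip q _ x hx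
        · rw [pvG_cons_pos q x _ hx]
          refine pvStepB_pos q _ x hx ?_
          have hb : (pvG q (s :: S')).2 ≤ PySem.Str.len s.1 := by
            refine pvG_snd_le q _ _ (by have := pvLen_nonneg s.1; omega) ?_
            intro y hy
            rcases List.mem_cons.mp hy with rfl | hy'
            · exact le_refl _
            · have := hhead y hy'; unfold pvKey at this; omega
          have hxs : PySem.Str.len s.1 < PySem.Str.len x.1 := by unfold pvKey at hls; omega
          omega
      · -- x is not longer than s: x is inserted somewhere after s
        have hins : PySem.List.insertBy (fun a b => decide (pvKey a < pvKey b)) x (s :: S')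
            = s :: PySem.List.insertBy (fun a b => decide (pvKey a < pvKey b)) x S' := by
          simp [PySem.List.insertBy, hls]
        rw [hins]
        cases hs : PySem.Str.isIn s.1 q
        · rw [pvG_cons_neg q s S' hs, pvG_cons_neg q s _ hs]
          exact ih hS'
        · rw [pvG_cons_pos q s S' hs, pvG_cons_pos q s _ hs]
          refine pvStepB_small q _ x ?_
          unfold pvKey at hls
          simp only
          omega

-- B's fold over the original list equals the characterisation of A's sorted list
lemma pvFold_eq_g (q : String) (l : List (String × String)) :
    l.foldl (pvStepB q) (none, -1) = pvG q (PySem.List.sorted l pvKey) := by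
  induction l using List.reverseRecOn with
  | nil => simp [PySem.List.sorted_eq_foldl_insertBy, pvG]
  | append_singleton l x ih =>
      rw [List.foldl_append, List.foldl_cons, List.foldl_nil, ih,
        PySem.List.sorted_eq_foldl_insertBy (l ++ [x]) pvKey, List.foldl_append, List.foldl_cons,
        List.foldl_nil, ← PySem.List.sorted_eq_foldl_insertBy]
      exact pvStepB_g q x _ (PySem.List.sorted_pairwise l pvKey)

-- ===== VERDICT (by name: the statement is the Claim_ definition above) =====
theorem resolve_explicit_scope_target_spec : Claim_equal_resolve_explicit_scope_target := by
  intro question _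
  unfold Spec_resolve_explicit_scope_target resolve_explicit_scope_target resolve_explicit_scope_target_alt
  by_cases h : PySem.Str.strip (PySem.Str.lower (if question = "" then "" else question)) = "" <;>
    simp only [h, if_true, if_false]
  rw [pvScanA_eq_g, pvFold_eq_g]
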